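-- pv_equiv track=rewrite | github.com/uriyah92/math_games | math_games.py | compare_1d_lists
-- ===== SOURCE A (Python) =====
-- import typing
--
-- def compare_1d_lists(l1: typing.List[int], l2: typing.List[int]) -> bool:
--     if len(l1) != len(l2):
--         return False
--     if len(l1) == 0:
--         return True
--     if l1[0] == l2[0]:
--         return compare_1d_lists(l1[1:], l2[1:])
--     else:
--         return False
-- ===== SOURCE B (Python) =====
-- import typing
--
-- def compare_1d_lists(l1: typing.List[int], l2: typing.List[int]) -> bool:
--     if len(l1) != len(l2):
--         return False
--     for x, y in zip(l1, l2):
--         if x != y: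
--             return False
--     return True
-- ===== Notes on version B (the rewrite author's own statement) =====
-- stated objective: faster
-- what changed: Replaced A's tail recursion with repeated tail slicing (each slice copies the rest of the list) by a single iterative pass over zip(l1, l2) with an early return on the first mismatch.
import Mathlib
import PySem

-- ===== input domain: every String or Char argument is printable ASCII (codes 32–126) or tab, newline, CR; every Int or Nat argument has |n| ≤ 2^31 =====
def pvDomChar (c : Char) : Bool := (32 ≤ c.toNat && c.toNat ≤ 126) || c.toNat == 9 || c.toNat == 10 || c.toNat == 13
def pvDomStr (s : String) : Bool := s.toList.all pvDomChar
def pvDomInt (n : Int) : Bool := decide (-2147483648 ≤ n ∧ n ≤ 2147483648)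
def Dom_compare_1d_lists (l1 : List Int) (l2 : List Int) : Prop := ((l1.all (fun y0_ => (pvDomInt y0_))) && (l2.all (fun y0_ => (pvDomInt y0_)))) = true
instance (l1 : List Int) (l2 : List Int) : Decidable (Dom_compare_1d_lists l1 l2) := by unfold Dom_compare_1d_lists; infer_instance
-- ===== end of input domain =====

-- B replaces A's tail recursion over sliced tails with one iterative pass over the zipped lists (idiomatic).


-- ===== PORT A =====
-- Literal transliteration: length guard, empty check, compare heads, recurse on the tails (l1[1:], l2[1:]).
def compare_1d_lists (l1 : List Int) (l2 : List Int) : Bool :=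
  if l1.length ≠ l2.length then false
  else if l1.length = 0 then true
  else match l1, l2 with
    | a :: t1, b :: t2 => if a = b then compare_1d_lists t1 t2 else false
    | _, _ => true  -- unreachable: both lists nonempty here

-- ===== PORT B =====
-- the for-loop over zip(l1, l2) with early return
def compareLoop : List (Int × Int) → Bool
  | [] => true
  | (x, y) :: rest => if x ≠ y then false else compareLoop rest

def compare_1d_lists_alt (l1 : List Int) (l2 : List Int) : Bool :=
  if l1.length ≠ l2.length then false
  else compareLoop (l1.zip l2)

-- ===== PRECONDITION & SPEC =====
def Spec_compare_1d_lists (l1 : List Int) (l2 : List Int) (out : Bool) : Prop := out = compare_1d_lists_alt l1 l2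
instance (l1 : List Int) (l2 : List Int) (out : Bool) : Decidable (Spec_compare_1d_lists l1 l2 out) := by unfold Spec_compare_1d_lists; infer_instance

-- ===== CLAIM (what is proved, stated in full; the proofs are below) =====
def Claim_equal_compare_1d_lists : Prop := ∀ (l1 : List Int) (l2 : List Int), Dom_compare_1d_lists l1 l2 → Spec_compare_1d_lists l1 l2 (compare_1d_lists l1 l2)

-- ===== LEMMAS AND PROOFS =====
theorem compare_1d_lists_eq_alt (l1 l2 : List Int) :
    compare_1d_lists l1 l2 = compare_1d_lists_alt l1 l2 := by
  induction l1 generalizing l2 with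
  | nil =>
    cases l2 <;> simp [compare_1d_lists, compare_1d_lists_alt, compareLoop]
  | cons a t1 ih =>
    cases l2 with
    | nil => simp [compare_1d_lists, compare_1d_lists_alt]
    | cons b t2 =>
      by_cases hlen : t1.length = t2.length
      · by_cases hab : a = b
        · simp [compare_1d_lists, compare_1d_lists_alt, compareLoop, hlen, hab,
            ih t2, compare_1d_lists_alt]
        · simp [compare_1d_lists, compare_1d_lists_alt, compareLoop, hlen, hab]
      · simp [compare_1d_lists, compare_1d_lists_alt, hlen]

-- ===== VERDICT (by name: the statement is the Claim_ definition above) =====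
theorem compare_1d_lists_spec : Claim_equal_compare_1d_lists := by
  intro l1 l2 _
  exact compare_1d_lists_eq_alt l1 l2
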